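-- pv_equiv track=rewrite | github.com/erliu8/Zishu-sensei | zishu/adapters/intelligent/code_generator.py | _basic_python_format
-- ===== SOURCE A (Python) =====
-- def _basic_python_format(code: str) -> str:
--     """基础Python格式化"""
--     lines = code.split("\n")
--     formatted_lines = []
--     indent_level = 0
--
--     for line in lines:
--         stripped = line.strip()
--         if not stripped:
--             formatted_lines.append("")
--             continue
--
--         # 处理缩进
--         if any(
--             stripped.startswith(keyword)
--             for keyword in [
--                 "def ",
--                 "class ",
--                 "if ",
--                 "elif ",
--                 "else:",
--                 "for ",
--                 "while ",
--                 "with ",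
--                 "try:",
--                 "except",
--                 "finally:",
--             ]
--         ):
--             formatted_lines.append("    " * indent_level + stripped)
--             if stripped.endswith(":"):
--                 indent_level += 1
--         elif (
--             stripped.startswith("return ")
--             or stripped.startswith("break")
--             or stripped.startswith("continue")
--         ):
--             formatted_lines.append("    " * indent_level + stripped)
--         else:
--             formatted_lines.append("    " * indent_level + stripped)
--
--     return "\n".join(formatted_lines)
-- ===== SOURCE B (Python) =====
-- def _basic_python_format(code: str) -> str:
--     """基础Python格式化 — prefix-table re-implementation."""
--     KEYWORDS = ("def ", "class ", "if ", "elif ", "else:", "for ",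
--                 "while ", "with ", "try:", "except", "finally:")
--     stripped = [line.strip() for line in code.split("\n")]
--     # opener[i] = 1 iff line i opens a new indentation level
--     opener = [1 if s and s.startswith(KEYWORDS) and s.endswith(":") else 0
--               for s in stripped]
--     # exclusive prefix sums: depth[i] = number of openers strictly before i
--     n = len(stripped)
--     depth = [0] * n
--     for i in range(1, n):
--         depth[i] = depth[i - 1] + opener[i - 1]
--     return "\n".join("" if not s else "    " * d + s
--                      for s, d in zip(stripped, depth))
-- ===== Notes on version B (the rewrite author's own statement) =====
-- stated objective: alternative
-- what changed: Replaces A's single pass with a running indent counter and per-branch appends by a table pipeline: strip all lines, mark each line as an opener, compute indentation depths as exclusive prefix sums, then render every line from the table.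
import Mathlib
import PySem

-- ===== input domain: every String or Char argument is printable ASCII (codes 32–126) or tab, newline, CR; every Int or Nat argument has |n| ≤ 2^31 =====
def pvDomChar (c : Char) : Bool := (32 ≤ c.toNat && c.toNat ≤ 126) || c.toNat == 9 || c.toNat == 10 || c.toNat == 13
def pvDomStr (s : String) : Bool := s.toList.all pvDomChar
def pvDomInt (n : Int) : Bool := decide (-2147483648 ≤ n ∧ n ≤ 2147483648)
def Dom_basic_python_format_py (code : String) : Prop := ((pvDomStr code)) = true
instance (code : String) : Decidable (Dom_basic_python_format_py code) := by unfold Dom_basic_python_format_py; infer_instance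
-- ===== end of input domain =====

-- B replaces A's running-counter single pass by a strip/opener/prefix-sum table pipeline (alternative decomposition, same cost).

-- ===== PORT A =====
-- the keyword list of A's `any(...)`
def aKeywords : List (List Char) :=
  ["def ".toList, "class ".toList, "if ".toList, "elif ".toList, "else:".toList,
   "for ".toList, "while ".toList, "with ".toList, "try:".toList, "except".toList,
   "finally:".toList]

-- "    " * indent_level
def aIndent : Nat → List Char
  | 0 => []
  | n + 1 => "    ".toList ++ aIndent n

-- the `for line in lines` loop carrying `indent_level`, appending to `formatted_lines`
def aLoop : List (List Char) → Nat → List (List Char)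
  | [], _ => []
  | line :: rest, indent =>
    let stripped := PySem.Chars.strip line
    if stripped.isEmpty then
      [] :: aLoop rest indent
    else if aKeywords.any (fun k => PySem.Chars.startswith stripped k) then
      (aIndent indent ++ stripped) ::
        aLoop rest (if PySem.Chars.endswith stripped [':'] then indent + 1 else indent)
    else if PySem.Chars.startswith stripped "return ".toList
            || PySem.Chars.startswith stripped "break".toList
            || PySem.Chars.startswith stripped "continue".toList then
      (aIndent indent ++ stripped) :: aLoop rest indent
    else
      (aIndent indent ++ stripped) :: aLoop rest indent

def basic_python_format_py (code : String) : String :=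
  String.ofList (PySem.Chars.join ['\n'] (aLoop (PySem.Chars.splitOn code.toList ['\n']) 0))

-- ===== PORT B =====
def bKeywords : List (List Char) :=
  ["def ".toList, "class ".toList, "if ".toList, "elif ".toList, "else:".toList,
   "for ".toList, "while ".toList, "with ".toList, "try:".toList, "except".toList,
   "finally:".toList]

-- opener[i] = 1 iff stripped line i opens a new indentation level
def bOpener (s : List Char) : Nat :=
  if !s.isEmpty && bKeywords.any (fun k => PySem.Chars.startswith s k)
     && PySem.Chars.endswith s [':'] then 1 else 0

-- depth[i] = depth[i-1] + opener[i-1], i.e. the exclusive prefix sums of opener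
def bDepths : List Nat → Nat → List Nat
  | [], _ => []
  | o :: rest, d => d :: bDepths rest (d + o)

-- "    " * d
def bRepeat : Nat → List Char
  | 0 => []
  | n + 1 => "    ".toList ++ bRepeat n

def basic_python_format_py_alt (code : String) : String :=
  let stripped := (PySem.Chars.splitOn code.toList ['\n']).map PySem.Chars.strip
  let opener := stripped.map bOpener
  let depth := bDepths opener 0
  let outLines := List.zipWith
    (fun s d => if s.isEmpty then ([] : List Char) else bRepeat d ++ s) stripped depth
  String.ofList (PySem.Chars.join ['\n'] outLines)

-- ===== PRECONDITION & SPEC =====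
def Spec_basic_python_format_py (code : String) (out : String) : Prop := out = basic_python_format_py_alt code
instance (code : String) (out : String) : Decidable (Spec_basic_python_format_py code out) := by unfold Spec_basic_python_format_py; infer_instance

-- ===== CLAIM (what is proved, stated in full; the proofs are below) =====
def Claim_equal_basic_python_format_py : Prop := ∀ (code : String), Dom_basic_python_format_py code → Spec_basic_python_format_py code (basic_python_format_py code)

-- ===== LEMMAS AND PROOFS =====
lemma bRepeat_eq_aIndent (n : Nat) : bRepeat n = aIndent n := by
  induction n with
  | zero => rfl
  | succ n ih => simp [bRepeat, aIndent, ih]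

lemma loop_eq (lines : List (List Char)) (ind : Nat) :
    aLoop lines ind =
      List.zipWith (fun s d => if s.isEmpty then ([] : List Char) else bRepeat d ++ s)
        (lines.map PySem.Chars.strip)
        (bDepths ((lines.map PySem.Chars.strip).map bOpener) ind) := by
  induction lines generalizing ind with
  | nil => rfl
  | cons line rest ih =>
    simp only [List.map_cons, bDepths, List.zipWith_cons_cons]
    have hset : bKeywords = aKeywords := rfl
    by_cases hemp : (PySem.Chars.strip line).isEmpty
    · have hop : bOpener (PySem.Chars.strip line) = 0 := by simp [bOpener, hemp]
      simp [aLoop, hemp, hop, ih]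
    · by_cases hkw : aKeywords.any (fun k => PySem.Chars.startswith (PySem.Chars.strip line) k)
      · by_cases hc : PySem.Chars.endswith (PySem.Chars.strip line) [':']
        · have hop : bOpener (PySem.Chars.strip line) = 1 := by
            simp [bOpener, hset, hkw, hc, hemp]
          simp [aLoop, hemp, hkw, hc, hop, bRepeat_eq_aIndent, ih]
        · have hop : bOpener (PySem.Chars.strip line) = 0 := by
            simp [bOpener, hc]
          simp [aLoop, hemp, hkw, hc, hop, bRepeat_eq_aIndent, ih]
      · have hkw' : (aKeywords.any fun k => PySem.Chars.startswith (PySem.Chars.strip line) k) = false :=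
          Bool.eq_false_iff.mpr hkw
        have hop : bOpener (PySem.Chars.strip line) = 0 := by
          simp [bOpener, hset, hkw']
        by_cases hr : PySem.Chars.startswith (PySem.Chars.strip line) "return ".toList
            || PySem.Chars.startswith (PySem.Chars.strip line) "break".toList
            || PySem.Chars.startswith (PySem.Chars.strip line) "continue".toList
        · simp [aLoop, hemp, hkw', hop, bRepeat_eq_aIndent, ih]
        · simp [aLoop, hemp, hkw', hop, bRepeat_eq_aIndent, ih]

-- ===== VERDICT (by name: the statement is the Claim_ definition above) =====
theorem basic_python_format_py_spec : Claim_equal_basic_python_format_py := by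
  intro code _
  show _ = _
  unfold basic_python_format_py basic_python_format_py_alt
  rw [loop_eq]
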